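-- pv_equiv track=rewrite | github.com/Shoptaki/Options_trading_bot | BOT_Code/code/BOT_bkp.py | get10StrikesNearUnderlying
-- ===== SOURCE A (Python) =====
-- from bisect import bisect_left
--
-- def take_closest(myList, myNumber):
--     pos = bisect_left(myList, myNumber)
--     if pos == 0:
--         return myList[0]
--     if pos == len(myList):
--         return myList[-1]
--     before = myList[pos - 1]
--     after = myList[pos]
--     return after if after - myNumber < myNumber - before else before
--
-- def returnLowHigh(stirkeList, CurrentPrice):
--     low = 0
--     high = 0
--     for _ in range(1, len(stirkeList) + 1):
--         fv = take_closest(sorted(stirkeList), CurrentPrice)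
--         if low == 0 and fv < CurrentPrice:
--             low = fv
--             stirkeList.remove(low)
--         elif high == 0 and fv > CurrentPrice:
--             high = fv
--             stirkeList.remove(high)
--         elif low == 0 or high == 0:
--             stirkeList.remove(fv)
--         else:
--             break
--     return low, high
--
-- def get10StrikesNearUnderlying(strikeList, undPrc, range_limit=3):
--     strikes_10_low = []
--     strikes_10_high = []
--     for _ in range(range_limit):
--         low, high = returnLowHigh(strikeList, undPrc)
--         strikes_10_low.append(low)
--         strikes_10_high.append(high)
--
--     return strikes_10_low, strikes_10_high
-- ===== SOURCE B (Python) =====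
-- # Faster re-implementation: sort once by distance-to-price (ties prefer the strike
-- # below, matching bisect's tie rule), then scan that order with a single pointer,
-- # reproducing the consume/skip logic of the original removal loop.
-- # NOTE: unlike A, B does not mutate strikeList; equivalence is on the return value.
-- def get10StrikesNearUnderlying(strikeList, undPrc, range_limit=3):
--     # 2*abs(d) + (x > undPrc): lexicographic (abs(d), x > undPrc) as one integer key
--     order = sorted(strikeList, key=lambda x: 2 * abs(x - undPrc) + (x > undPrc))
--     strikes_10_low = []
--     strikes_10_high = []
--     i = 0
--     for _ in range(range_limit):
--         low = 0
--         high = 0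
--         while i < len(order) and (low == 0 or high == 0):
--             x = order[i]
--             i += 1
--             if low == 0 and x < undPrc:
--                 low = x
--             elif high == 0 and x > undPrc:
--                 high = x
--         strikes_10_low.append(low)
--         strikes_10_high.append(high)
--     return strikes_10_low, strikes_10_high
-- ===== Notes on version B (the rewrite author's own statement) =====
-- stated objective: faster
-- what changed: Replaces A's per-pick re-sort and list.remove passes (a fresh sort of the remaining strikes for every strike consumed) with a single sort by distance-to-price (ties prefer the strike below, matching bisect's tie rule) followed by one pointer scan that reproduces the consume/skip logic; B does not mutate strikeList, equivalence is on the return value.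
import Mathlib
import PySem

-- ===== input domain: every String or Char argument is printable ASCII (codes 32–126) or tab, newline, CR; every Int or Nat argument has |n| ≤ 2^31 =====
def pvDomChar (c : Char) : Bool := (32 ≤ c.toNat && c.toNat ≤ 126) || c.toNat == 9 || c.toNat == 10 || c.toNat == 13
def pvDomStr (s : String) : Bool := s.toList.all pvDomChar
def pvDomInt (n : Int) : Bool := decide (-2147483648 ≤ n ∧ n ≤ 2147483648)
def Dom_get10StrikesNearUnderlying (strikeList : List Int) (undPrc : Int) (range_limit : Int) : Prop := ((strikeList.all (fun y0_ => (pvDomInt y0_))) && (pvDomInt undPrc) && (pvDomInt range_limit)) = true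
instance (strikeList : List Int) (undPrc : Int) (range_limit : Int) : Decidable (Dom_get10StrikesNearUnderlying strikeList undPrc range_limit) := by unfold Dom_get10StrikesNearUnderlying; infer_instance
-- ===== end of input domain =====

-- B sorts once by distance to the price and scans that order with one pointer, replacing
-- A's repeated sort-and-remove passes (objective: faster). A mutates strikeList in place
-- (it removes the consumed strikes); B does not — the equivalence proved here is about the
-- RETURN value only.

-- ===== PORT A =====
-- take_closest(myList, myNumber); bisect_left is PySem.List.bisectLeft.
-- Returns Option: none = IndexError (myList[0] on an empty list) — unreachable as A calls it.
def takeClosest? (myList : List Int) (myNumber : Int) : Option Int :=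
  let pos := PySem.List.bisectLeft myList myNumber
  if pos = 0 then PySem.List.pyGet? myList 0
  else if pos = myList.length then PySem.List.pyGet? myList (-1)
  else
    match PySem.List.pyGet? myList ((pos : Int) - 1), PySem.List.pyGet? myList (pos : Int) with
    | some before, some after =>
        some (if after - myNumber < myNumber - before then after else before)
    | _, _ => none

-- the 'for _ in range(1, len(stirkeList) + 1)' loop of returnLowHigh: fuel = initial length;
-- state (low, high, stirkeList); the 'none' fallbacks (empty list / ValueError of remove)
-- are unreachable on every execution A performs.
def returnLowHighLoop (price : Int) : Nat → Int → Int → List Int → Int × Int × List Int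
  | 0, low, high, l => (low, high, l)
  | fuel+1, low, high, l =>
    match takeClosest? (PySem.List.sorted l (fun x => x)) price with
    | none => (low, high, l)
    | some fv =>
      if low = 0 ∧ fv < price then
        match PySem.List.remove? l fv with
        | some l' => returnLowHighLoop price fuel fv high l'
        | none => (low, high, l)
      else if high = 0 ∧ fv > price then
        match PySem.List.remove? l fv with
        | some l' => returnLowHighLoop price fuel low fv l'
        | none => (low, high, l)
      else if low = 0 ∨ high = 0 then
        match PySem.List.remove? l fv with
        | some l' => returnLowHighLoop price fuel low high l'
        | none => (low, high, l)
      else (low, high, l)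

-- returnLowHigh(stirkeList, CurrentPrice): returns (low, high) plus the mutated list
def returnLowHigh (stirkeList : List Int) (currentPrice : Int) : Int × Int × List Int :=
  returnLowHighLoop currentPrice stirkeList.length 0 0 stirkeList

-- the 'for _ in range(range_limit)' loop of get10StrikesNearUnderlying
def get10Loop (p : Int) : Nat → List Int → List Int × List Int → List Int × List Int
  | 0, _, acc => acc
  | k+1, l, acc =>
    let r := returnLowHigh l p
    get10Loop p k r.2.2 (acc.1 ++ [r.1], acc.2 ++ [r.2.1])

def get10StrikesNearUnderlying (strikeList : List Int) (undPrc : Int) (range_limit : Int) : List Int × List Int :=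
  get10Loop undPrc range_limit.toNat strikeList ([], [])

-- ===== PORT B =====
-- B's sort key: 2*abs(x - undPrc) + (x > undPrc)
def pvKey (p x : Int) : Int := 2 * |x - p| + (if x > p then 1 else 0)

-- the 'while i < len(order) and (low == 0 or high == 0)' scan: consumes the suffix order[i:]
def scanPick (p : Int) : List Int → Int → Int → Int × Int × List Int
  | [], low, high => (low, high, [])
  | x :: rest, low, high =>
    if low = 0 ∨ high = 0 then
      if low = 0 ∧ x < p then scanPick p rest x high
      else if high = 0 ∧ x > p then scanPick p rest low x
      else scanPick p rest low high
    else (low, high, x :: rest)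

-- the 'for _ in range(range_limit)' loop of B
def altLoop (p : Int) : Nat → List Int → List Int × List Int → List Int × List Int
  | 0, _, acc => acc
  | k+1, s, acc =>
    let r := scanPick p s 0 0
    altLoop p k r.2.2 (acc.1 ++ [r.1], acc.2 ++ [r.2.1])

def get10StrikesNearUnderlying_alt (strikeList : List Int) (undPrc : Int) (range_limit : Int) : List Int × List Int :=
  altLoop undPrc range_limit.toNat (PySem.List.sorted strikeList (fun x => pvKey undPrc x)) ([], [])

-- ===== PRECONDITION & SPEC =====
def Spec_get10StrikesNearUnderlying (strikeList : List Int) (undPrc : Int) (range_limit : Int) (out : List Int × List Int) : Prop := out = get10StrikesNearUnderlying_alt strikeList undPrc range_limit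
instance (strikeList : List Int) (undPrc : Int) (range_limit : Int) (out : List Int × List Int) : Decidable (Spec_get10StrikesNearUnderlying strikeList undPrc range_limit out) := by unfold Spec_get10StrikesNearUnderlying; infer_instance

-- ===== CLAIM (what is proved, stated in full; the proofs are below) =====
def Claim_equal_get10StrikesNearUnderlying : Prop := ∀ (strikeList : List Int) (undPrc : Int) (range_limit : Int), Dom_get10StrikesNearUnderlying strikeList undPrc range_limit → Spec_get10StrikesNearUnderlying strikeList undPrc range_limit (get10StrikesNearUnderlying strikeList undPrc range_limit)

-- ===== LEMMAS AND PROOFS =====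

theorem pvKey_injective (p : Int) : Function.Injective (pvKey p) := by
  intro x y h
  unfold pvKey at h
  rcases abs_cases (x - p) with ⟨hx, hx'⟩ | ⟨hx, hx'⟩ <;>
    rcases abs_cases (y - p) with ⟨hy, hy'⟩ | ⟨hy, hy'⟩ <;>
      simp only [hx, hy] at h <;> split_ifs at h <;> omega

theorem pvKey_mono_ge (p a b : Int) (h1 : p ≤ a) (h2 : a ≤ b) : pvKey p a ≤ pvKey p b := by
  unfold pvKey; rw [abs_of_nonneg (by omega), abs_of_nonneg (by omega)]; split_ifs <;> omega

theorem pvKey_mono_lt (p a b : Int) (h1 : a < p) (h2 : b ≤ a) : pvKey p a ≤ pvKey p b := by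
  unfold pvKey; rw [abs_of_neg (by omega), abs_of_neg (by omega)]; split_ifs <;> omega

theorem pvKey_after_le_before (p before after : Int) (h1 : before < p) (h2 : p ≤ after)
    (h : after - p < p - before) : pvKey p after ≤ pvKey p before := by
  unfold pvKey; rw [abs_of_nonneg (by omega), abs_of_neg (by omega)]; split_ifs <;> omega

theorem pvKey_before_le_after (p before after : Int) (h1 : before < p) (h2 : p ≤ after)
    (h : ¬(after - p < p - before)) : pvKey p before ≤ pvKey p after := by
  unfold pvKey; rw [abs_of_neg (by omega), abs_of_nonneg (by omega)]; split_ifs <;> omega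

-- pvKey-minimality of take_closest's pick on the sorted list
theorem takeClosest?_min (l : List Int) (p : Int) (hne : l ≠ []) :
    ∃ c, takeClosest? (PySem.List.sorted l (fun x => x)) p = some c ∧ c ∈ l ∧
      ∀ y ∈ l, pvKey p c ≤ pvKey p y := by
  have hpw : List.Pairwise (fun a b : Int => a ≤ b) (PySem.List.sorted l (fun x => x)) :=
    PySem.List.sorted_pairwise l (fun x : Int => x)
  set s := PySem.List.sorted l (fun x => x) with hsdef
  have hperm : s.Perm l := PySem.List.sorted_perm l _ _
  have hsl : s.length = l.length := PySem.List.length_sorted l _ _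
  have hsne : 0 < s.length := by
    rw [hsl]; exact List.length_pos_of_ne_nil hne
  obtain ⟨hle, hlt, hge⟩ := PySem.List.bisectLeft_spec s p hpw
  set pos := PySem.List.bisectLeft s p with hposdef
  have hmono : ∀ (i j : Nat) (hi : i < s.length) (hj : j < s.length), i ≤ j → s[i] ≤ s[j] := by
    intro i j hi hj hij
    rcases Nat.lt_or_eq_of_le hij with h | h
    · exact List.pairwise_iff_getElem.mp hpw i j hi hj h
    · subst h; exact le_refl _
  have hally : ∀ y ∈ l, ∃ (j : Nat) (hj : j < s.length), s[j] = y := by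
    intro y hy
    exact List.mem_iff_getElem.mp (hperm.mem_iff.mpr hy)
  have hmeml : ∀ (j : Nat) (hj : j < s.length), s[j] ∈ l :=
    fun j hj => hperm.mem_iff.mp (List.getElem_mem hj)
  simp only [takeClosest?, ← hposdef]
  by_cases h0 : pos = 0
  · -- all elements ≥ p; the smallest element wins
    rw [if_pos h0, PySem.List.pyGet?_zero, List.getElem?_eq_getElem hsne]
    refine ⟨s[0], rfl, hmeml 0 hsne, ?_⟩
    intro y hy
    obtain ⟨j, hj, hjy⟩ := hally y hy
    subst hjy
    exact pvKey_mono_ge p s[0] s[j] (hge 0 hsne (by omega)) (hmono 0 j hsne hj (by omega))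
  · by_cases hL : pos = s.length
    · -- all elements < p; the largest element wins
      rw [if_neg h0, if_pos hL, PySem.List.pyGet?_neg_one,
        List.getLast?_eq_getElem?, List.getElem?_eq_getElem (by omega)]
      refine ⟨s[s.length - 1], rfl, hmeml _ (by omega), ?_⟩
      intro y hy
      obtain ⟨j, hj, hjy⟩ := hally y hy
      subst hjy
      exact pvKey_mono_lt p s[s.length - 1] s[j]
        (hlt _ (by omega) (by omega)) (hmono j (s.length - 1) hj (by omega) (by omega))
    · -- before = s[pos-1] < p ≤ s[pos] = after
      have hposlt : pos < s.length := lt_of_le_of_ne hle hL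
      have hpos1 : pos - 1 < s.length := by omega
      have hbe : PySem.List.pyGet? s ((pos : Int) - 1) = some s[pos - 1] := by
        have hc : ((pos : Int) - 1) = ((pos - 1 : Nat) : Int) := by omega
        rw [hc, PySem.List.pyGet?_natCast, List.getElem?_eq_getElem hpos1]
      have haf : PySem.List.pyGet? s (pos : Int) = some s[pos] := by
        rw [PySem.List.pyGet?_natCast, List.getElem?_eq_getElem hposlt]
      rw [if_neg h0, if_neg hL, hbe, haf]
      simp only []
      have hbp : s[pos - 1] < p := hlt _ hpos1 (by omega)
      have hpa : p ≤ s[pos] := hge _ hposlt (by omega)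
      have hkey : ∀ y ∈ l, pvKey p s[pos - 1] ≤ pvKey p y ∨ pvKey p s[pos] ≤ pvKey p y := by
        intro y hy
        obtain ⟨j, hj, hjy⟩ := hally y hy
        subst hjy
        by_cases hjp : j < pos
        · exact Or.inl (pvKey_mono_lt p s[pos - 1] s[j] hbp (hmono j (pos - 1) hj hpos1 (by omega)))
        · exact Or.inr (pvKey_mono_ge p s[pos] s[j] hpa (hmono pos j hposlt hj (by omega)))
      refine ⟨if s[pos] - p < p - s[pos - 1] then s[pos] else s[pos - 1], rfl, ?_, ?_⟩
      · split_ifs with hch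
        · exact hmeml _ hposlt
        · exact hmeml _ hpos1
      · split_ifs with hch
        · intro y hy
          rcases hkey y hy with h | h
          · exact le_trans (pvKey_after_le_before p s[pos - 1] s[pos] hbp hpa hch) h
          · exact h
        · intro y hy
          rcases hkey y hy with h | h
          · exact h
          · exact le_trans (pvKey_before_le_after p s[pos - 1] s[pos] hbp hpa hch) h

-- head of the key-sorted list IS take_closest's pick
theorem takeClosest?_eq_head (l : List Int) (p : Int) {m : Int} {t : List Int}
    (hs : PySem.List.sorted l (fun x => pvKey p x) = m :: t) :
    takeClosest? (PySem.List.sorted l (fun x => x)) p = some m := by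
  obtain ⟨c, hc, hmem, hmin⟩ := takeClosest?_min l p (by
    intro h; rw [h] at hs; simp [PySem.List.sorted] at hs)
  have hm : m ∈ l := by
    have := (PySem.List.mem_sorted l (fun x => pvKey p x) false m).mp (by rw [hs]; simp)
    exact this
  have h1 : pvKey p m ≤ pvKey p c :=
    PySem.List.key_head_sorted_le l (fun x => pvKey p x) hs c hmem
  have h2 : pvKey p c ≤ pvKey p m := hmin m hm
  have : c = m := pvKey_injective p (le_antisymm h2 h1)
  rw [hc, this]

-- erasing the head of the key-sorted list leaves the tail (as key-sorted list)
theorem sorted_erase_head (l : List Int) (p : Int) {m : Int} {t : List Int}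
    (hs : PySem.List.sorted l (fun x => pvKey p x) = m :: t) :
    PySem.List.sorted (l.erase m) (fun x => pvKey p x) = t := by
  have hperm : (m :: t).Perm l := by rw [← hs]; exact PySem.List.sorted_perm _ _ _
  have hperm' : ((m :: t).erase m).Perm (l.erase m) := hperm.erase m
  simp only [List.erase_cons_head] at hperm'
  have hpw : List.Pairwise (fun a b => pvKey p a ≤ pvKey p b) (m :: t) := by
    rw [← hs]; exact PySem.List.sorted_pairwise l _
  exact PySem.List.eq_of_perm_of_pairwise_le_of_injective (fun x => pvKey p x)
    (pvKey_injective p)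
    (PySem.List.sorted_perm (l.erase m) _ _ |>.trans hperm'.symm)
    (PySem.List.sorted_pairwise _ _) hpw.tail

-- MAIN: one returnLowHigh pass equals one scanPick pass over the key-sorted list;
-- the surviving strikes of A's list are, key-sorted, exactly B's surviving suffix.
theorem main_loop (p : Int) : ∀ (n : Nat) (l : List Int), l.length = n → ∀ (low high : Int),
    ∃ rest, returnLowHighLoop p n low high l =
        ((scanPick p (PySem.List.sorted l (fun x => pvKey p x)) low high).1,
         (scanPick p (PySem.List.sorted l (fun x => pvKey p x)) low high).2.1, rest) ∧
      PySem.List.sorted rest (fun x => pvKey p x) =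
        (scanPick p (PySem.List.sorted l (fun x => pvKey p x)) low high).2.2 := by
  intro n
  induction n with
  | zero =>
    intro l hl low high
    have h : l = [] := List.eq_nil_of_length_eq_zero hl
    subst h
    exact ⟨[], rfl, rfl⟩
  | succ n ih =>
    intro l hl low high
    have hne : l ≠ [] := by intro h; subst h; simp at hl
    obtain ⟨m, t, hs⟩ : ∃ m t, PySem.List.sorted l (fun x => pvKey p x) = m :: t := by
      cases h : PySem.List.sorted l (fun x => pvKey p x) with
      | nil => exact absurd ((PySem.List.sorted_eq_nil_iff _ _ _).mp h) hne
      | cons a b => exact ⟨a, b, rfl⟩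
    have htc := takeClosest?_eq_head l p hs
    have hm : m ∈ l := (PySem.List.mem_sorted l _ false m).mp (by rw [hs]; simp)
    have hrm := PySem.List.remove?_eq_some_erase l m hm
    have hlen : (l.erase m).length = n := by
      rw [List.length_erase_of_mem hm, hl]; omega
    have hst := sorted_erase_head l p hs
    rw [hs]
    simp only [returnLowHighLoop, htc, hrm, scanPick]
    by_cases hlh : low = 0 ∨ high = 0
    · simp only [if_pos hlh]
      by_cases h1 : low = 0 ∧ m < p
      · simp only [if_pos h1]
        obtain ⟨rest, ha, hb⟩ := ih (l.erase m) hlen m high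
        rw [hst] at ha hb
        exact ⟨rest, ha, hb⟩
      · simp only [if_neg h1]
        by_cases h2 : high = 0 ∧ m > p
        · simp only [if_pos h2]
          obtain ⟨rest, ha, hb⟩ := ih (l.erase m) hlen low m
          rw [hst] at ha hb
          exact ⟨rest, ha, hb⟩
        · simp only [if_neg h2]
          obtain ⟨rest, ha, hb⟩ := ih (l.erase m) hlen low high
          rw [hst] at ha hb
          exact ⟨rest, ha, hb⟩
    · have h1 : ¬(low = 0 ∧ m < p) := fun h => hlh (Or.inl h.1)
      have h2 : ¬(high = 0 ∧ m > p) := fun h => hlh (Or.inr h.1)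
      simp only [if_neg h1, if_neg h2, if_neg hlh]
      exact ⟨l, rfl, hs⟩

-- outer loops agree
theorem outer_loop (p : Int) : ∀ (k : Nat) (l : List Int) (acc : List Int × List Int),
    get10Loop p k l acc = altLoop p k (PySem.List.sorted l (fun x => pvKey p x)) acc := by
  intro k
  induction k with
  | zero => intro l acc; rfl
  | succ k ih =>
    intro l acc
    obtain ⟨rest, h1, h2⟩ := main_loop p l.length l rfl 0 0
    simp only [get10Loop, altLoop, returnLowHigh, h1, ih rest, h2]

-- ===== VERDICT (by name: the statement is the Claim_ definition above) =====
theorem get10StrikesNearUnderlying_spec : Claim_equal_get10StrikesNearUnderlying := by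
  intro strikeList undPrc range_limit _
  unfold Spec_get10StrikesNearUnderlying get10StrikesNearUnderlying get10StrikesNearUnderlying_alt
  exact outer_loop undPrc range_limit.toNat strikeList ([], [])
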